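-- pv_equiv track=rewrite | github.com/nlovin/adventofcode | day5_1.py | check_ordering
-- ===== SOURCE A (Python) =====
-- from collections import defaultdict
--
-- def check_ordering(lst, pairs):
--     # Create a dictionary of rules: {number: [numbers that must come after it]}
--     rules = defaultdict(set)
--     for before, after in pairs:
--         rules[before].add(after)
--
--     # For each pair of numbers in the list
--     for i, num in enumerate(lst):
--         # Look at all numbers that come after this one
--         for after_num in lst[i+1:]:
--             # If we have a rule where 'after_num' should come before 'num'
--             # then this list violates our rules
--             if num in rules.get(after_num, set()):
--                 return False
--     return True
-- ===== SOURCE B (Python) =====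
-- def check_ordering(lst, pairs):
--     # Judge each rule directly: (before, after) is violated exactly when
--     # 'before' still occurs somewhere after the first occurrence of 'after'.
--     for before, after in pairs:
--         if after in lst and before in lst[lst.index(after) + 1:]:
--             return False
--     return True
-- ===== Notes on version B (the rewrite author's own statement) =====
-- stated objective: faster
-- what changed: Instead of A's nested all-pairs scan of the list against a rules dict, B iterates over the rules themselves: a rule (before, after) is violated iff 'before' occurs in the list after the first occurrence of 'after'; no dict and no quadratic list scan.
import Mathlib
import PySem

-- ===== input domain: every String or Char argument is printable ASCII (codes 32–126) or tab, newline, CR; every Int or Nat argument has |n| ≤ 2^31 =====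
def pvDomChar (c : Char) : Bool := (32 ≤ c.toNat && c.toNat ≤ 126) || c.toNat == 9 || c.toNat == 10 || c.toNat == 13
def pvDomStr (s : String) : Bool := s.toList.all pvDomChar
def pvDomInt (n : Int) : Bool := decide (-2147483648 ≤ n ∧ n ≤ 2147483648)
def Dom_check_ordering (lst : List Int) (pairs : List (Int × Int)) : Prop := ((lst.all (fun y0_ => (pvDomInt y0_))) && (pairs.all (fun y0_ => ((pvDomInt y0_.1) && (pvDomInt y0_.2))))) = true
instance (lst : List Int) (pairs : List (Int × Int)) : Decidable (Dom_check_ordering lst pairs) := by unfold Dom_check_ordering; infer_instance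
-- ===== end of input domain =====

-- ===== PORT A =====
-- B drops A's rules dict and nested list scan: it judges each rule directly against the list (objective: faster — one O(n) list check per rule instead of the quadratic all-pairs scan).

-- rules = defaultdict(set); for before, after in pairs: rules[before].add(after)
def buildRulesA (pairs : List (Int × Int)) : PySem.Dict Int (PySem.Set Int) :=
  pairs.foldl (fun d p => d.modify p.1 PySem.Set.empty (fun s => PySem.Set.add s p.2)) PySem.Dict.empty

-- inner loop: for after_num in lst[i+1:]: if num in rules.get(after_num, set()): return False
def innerA (rules : PySem.Dict Int (PySem.Set Int)) (num : Int) : List Int → Bool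
  | [] => true
  | a :: rest =>
      if PySem.Set.contains (rules.getD a PySem.Set.empty) num then false
      else innerA rules num rest

-- outer loop over enumerate(lst); lst[i+1:] is the tail at each step
def outerA (rules : PySem.Dict Int (PySem.Set Int)) : List Int → Bool
  | [] => true
  | num :: rest =>
      if innerA rules num rest then outerA rules rest else false

def check_ordering (lst : List Int) (pairs : List (Int × Int)) : Bool :=
  outerA (buildRulesA pairs) lst

-- ===== PORT B =====
-- for before, after in pairs: if after in lst and before in lst[lst.index(after)+1:]: return False
def scanB (lst : List Int) : List (Int × Int) → Bool
  | [] => true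
  | (before, after) :: rest =>
      if lst.contains after &&
         (PySem.List.slice lst
            (some (((PySem.List.index? lst after).getD 0 : Nat) + 1)) none).contains before
      then false
      else scanB lst rest

def check_ordering_alt (lst : List Int) (pairs : List (Int × Int)) : Bool :=
  scanB lst pairs

-- ===== PRECONDITION & SPEC =====
def Spec_check_ordering (lst : List Int) (pairs : List (Int × Int)) (out : Bool) : Prop := out = check_ordering_alt lst pairs
instance (lst : List Int) (pairs : List (Int × Int)) (out : Bool) : Decidable (Spec_check_ordering lst pairs out) := by unfold Spec_check_ordering; infer_instance

-- ===== CLAIM (what is proved, stated in full; the proofs are below) =====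
def Claim_equal_check_ordering : Prop := ∀ (lst : List Int) (pairs : List (Int × Int)), Dom_check_ordering lst pairs → Spec_check_ordering lst pairs (check_ordering lst pairs)

-- ===== LEMMAS AND PROOFS =====

-- "a occurs strictly before b in lst"
def Before (lst : List Int) (a b : Int) : Prop :=
  ∃ (i j : Nat), i < j ∧ lst[i]? = some a ∧ lst[j]? = some b

-- the rules dict contains a under key b exactly when (b, a) is one of the pairs
theorem rules_contains (pairs : List (Int × Int)) (b a : Int) :
    PySem.Set.contains ((buildRulesA pairs).getD b PySem.Set.empty) a = true ↔ (b, a) ∈ pairs := by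
  suffices h : ∀ (d : PySem.Dict Int (PySem.Set Int)),
      PySem.Set.contains ((pairs.foldl
          (fun d p => d.modify p.1 PySem.Set.empty (fun s => PySem.Set.add s p.2)) d).getD b PySem.Set.empty) a = true ↔
        PySem.Set.contains (d.getD b PySem.Set.empty) a = true ∨ (b, a) ∈ pairs by
    rw [buildRulesA, h]
    simp [PySem.Dict.getD_empty, PySem.Set.empty, PySem.Set.contains]
  induction pairs with
  | nil => intro d; simp
  | cons p rest ih =>
      intro d
      obtain ⟨p1, p2⟩ := p
      simp only [List.foldl_cons, ih, PySem.Dict.getD_modify, List.mem_cons, Prod.mk.injEq]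
      by_cases hb : b = p1
      · subst hb
        simp only [PySem.Set.contains_iff, PySem.Set.mem_add, if_true]
        tauto
      · simp only [if_neg hb, PySem.Set.contains_iff]
        tauto

theorem innerA_true_iff (rules : PySem.Dict Int (PySem.Set Int)) (num : Int) (l : List Int) :
    innerA rules num l = true ↔
      ∀ a ∈ l, ¬ PySem.Set.contains (rules.getD a PySem.Set.empty) num = true := by
  induction l with
  | nil => simp [innerA]
  | cons a t ih =>
      simp only [innerA]
      split_ifs with h
      · exact iff_of_false (by simp) (fun hall => hall a List.mem_cons_self h)
      · rw [ih]
        simp only [List.forall_mem_cons]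
        exact ⟨fun ht => ⟨h, ht⟩, fun p => p.2⟩

theorem outerA_true_iff (rules : PySem.Dict Int (PySem.Set Int)) (l : List Int) :
    outerA rules l = true ↔
      l.Pairwise (fun x y => ¬ PySem.Set.contains (rules.getD y PySem.Set.empty) x = true) := by
  induction l with
  | nil => simp [outerA]
  | cons num t ih =>
      simp only [outerA]
      split_ifs with h
      · rw [innerA_true_iff] at h
        rw [ih, List.pairwise_cons]
        exact ⟨fun hp => ⟨h, hp⟩, fun p => p.2⟩
      · exact iff_of_false (by simp)
          (fun hp => h ((innerA_true_iff rules num t).mpr (List.pairwise_cons.mp hp).1))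

-- A returns True exactly when no pair (b, a) has a before b in the list
theorem check_ordering_true_iff (lst : List Int) (pairs : List (Int × Int)) :
    check_ordering lst pairs = true ↔ ∀ p ∈ pairs, ¬ Before lst p.2 p.1 := by
  rw [check_ordering, outerA_true_iff, List.pairwise_iff_getElem]
  constructor
  · rintro h p hp ⟨i, j, hij, ha, hb⟩
    obtain ⟨hj, hb⟩ := List.getElem?_eq_some_iff.mp hb
    obtain ⟨hi, ha⟩ := List.getElem?_eq_some_iff.mp ha
    exact h i j hi hj hij (by rw [rules_contains, ha, hb]; exact hp)
  · intro h i j hi hj hij hc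
    rw [rules_contains] at hc
    exact h _ hc ⟨i, j, hij, List.getElem?_eq_some_iff.mpr ⟨hi, rfl⟩,
      List.getElem?_eq_some_iff.mpr ⟨hj, rfl⟩⟩

-- B's per-rule test hits exactly when 'after' occurs before 'before'
theorem hit_iff (lst : List Int) (before after : Int) :
    (lst.contains after &&
      (PySem.List.slice lst
        (some (((PySem.List.index? lst after).getD 0 : Nat) + 1)) none).contains before) = true ↔
      Before lst after before := by
  constructor
  · intro h
    rw [Bool.and_eq_true, List.contains_eq_mem, decide_eq_true_iff] at h
    obtain ⟨hmem, hdrop⟩ := h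
    obtain ⟨k, hk⟩ := Option.isSome_iff_exists.mp ((PySem.List.index?_isSome_iff lst after).mpr hmem)
    obtain ⟨hklen, hka, _⟩ := PySem.List.getElem_of_index?_eq_some hk
    rw [hk] at hdrop
    have hcast : (((some k).getD 0 : Nat) : Int) + 1 = (((k + 1 : Nat)) : Int) := by simp
    rw [hcast, PySem.List.slice_from_natCast, List.contains_eq_mem, decide_eq_true_iff,
      List.mem_iff_getElem] at hdrop
    obtain ⟨m, hm, hmb⟩ := hdrop
    rw [List.getElem_drop] at hmb
    have hjlen : k + 1 + m < lst.length := by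
      rw [List.length_drop] at hm; omega
    exact ⟨k, k + 1 + m, by omega, List.getElem?_eq_some_iff.mpr ⟨hklen, hka⟩,
      List.getElem?_eq_some_iff.mpr ⟨hjlen, hmb⟩⟩
  · rintro ⟨i, j, hij, ha, hb⟩
    obtain ⟨hi, ha⟩ := List.getElem?_eq_some_iff.mp ha
    obtain ⟨hj, hb⟩ := List.getElem?_eq_some_iff.mp hb
    have hmem : after ∈ lst := ha ▸ List.getElem_mem _
    obtain ⟨k, hk⟩ := Option.isSome_iff_exists.mp ((PySem.List.index?_isSome_iff lst after).mpr hmem)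
    obtain ⟨hklen, hka, hmin⟩ := PySem.List.getElem_of_index?_eq_some hk
    have hki : k ≤ i := by
      by_contra hlt
      exact hmin i (by omega) ha
    rw [Bool.and_eq_true, hk]
    refine ⟨by simp [List.contains_eq_mem, hmem], ?_⟩
    have hcast : (((some k).getD 0 : Nat) : Int) + 1 = (((k + 1 : Nat)) : Int) := by simp
    rw [hcast, PySem.List.slice_from_natCast, List.contains_eq_mem, decide_eq_true_iff,
      List.mem_iff_getElem]
    refine ⟨j - (k + 1), by rw [List.length_drop]; omega, ?_⟩
    rw [List.getElem_drop]
    have heq : k + 1 + (j - (k + 1)) = j := by omega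
    simp only [heq]
    exact hb

-- B returns True exactly when no pair (b, a) has a before b in the list
theorem check_ordering_alt_true_iff (lst : List Int) (pairs : List (Int × Int)) :
    check_ordering_alt lst pairs = true ↔ ∀ p ∈ pairs, ¬ Before lst p.2 p.1 := by
  rw [check_ordering_alt]
  induction pairs with
  | nil => simp [scanB]
  | cons p rest ih =>
      obtain ⟨b, a⟩ := p
      simp only [scanB]
      split_ifs with h
      · exact iff_of_false (by simp)
          (fun hall => hall (b, a) List.mem_cons_self ((hit_iff lst b a).mp h))
      · rw [ih]
        simp only [List.forall_mem_cons]
        exact ⟨fun ht => ⟨fun hv => h ((hit_iff lst b a).mpr hv), ht⟩, fun pr => pr.2⟩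

-- ===== VERDICT (by name: the statement is the Claim_ definition above) =====
theorem check_ordering_spec : Claim_equal_check_ordering := by
  intro lst pairs _
  unfold Spec_check_ordering
  have hA := check_ordering_true_iff lst pairs
  have hB := check_ordering_alt_true_iff lst pairs
  cases ha : check_ordering lst pairs <;> cases hb : check_ordering_alt lst pairs
  · rfl
  · exact absurd ((hA.mpr (hB.mp hb)).symm.trans ha) (by simp)
  · exact absurd ((hB.mpr (hA.mp ha)).symm.trans hb) (by simp)
  · rfl
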